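-- pv_equiv track=rewrite | github.com/sitkamar/ALG | rozklad.py | NumberofDevesionToSum
-- ===== SOURCE A (Python) =====
-- def NumberofDevesionToSum(n):
--     t = [[0 for j in range(n)] for i in range(n)]
--     for i in range(n):
--         t[i][i] = 1
--         t[i][0] = 1
--     for i in range(1,n):
--         for j in range(1,i):
--             for k in range(0,j):
--                 t[i][j] += t[i-j][k]
--     returner = 0
--     for i in range(0,n):
--         returner += t[n-1][i]
--     return returner
-- ===== SOURCE B (Python) =====
-- def NumberofDevesionToSum(n):
--     # Same values as A, but each table cell is read off a prefix-sum row,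
--     # removing A's innermost summation loop.
--     if n <= 0:
--         return 0
--     P = []  # P[i][j] = sum of A's t[i][0..j]
--     for i in range(n):
--         pref = [0] * n
--         for j in range(n):
--             if j == 0 or j == i:
--                 tij = 1
--             elif j < i:
--                 tij = P[i - j][j - 1]
--             else:
--                 tij = 0
--             pref[j] = tij if j == 0 else pref[j - 1] + tij
--         P.append(pref)
--     return P[n - 1][n - 1]
-- ===== Notes on version B (the rewrite author's own statement) =====
-- stated objective: alternative
-- what changed: B keeps one prefix-sum per DP row and reads each new cell t[i][j] directly as the prefix sum P[i-j][j-1], eliminating A's innermost summation loop (and A's separate init and final-sum passes); measured much faster at mid sizes (40x at n=256) but both exceed the probe's budget on huge n, so no speed is claimed.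
import Mathlib
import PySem

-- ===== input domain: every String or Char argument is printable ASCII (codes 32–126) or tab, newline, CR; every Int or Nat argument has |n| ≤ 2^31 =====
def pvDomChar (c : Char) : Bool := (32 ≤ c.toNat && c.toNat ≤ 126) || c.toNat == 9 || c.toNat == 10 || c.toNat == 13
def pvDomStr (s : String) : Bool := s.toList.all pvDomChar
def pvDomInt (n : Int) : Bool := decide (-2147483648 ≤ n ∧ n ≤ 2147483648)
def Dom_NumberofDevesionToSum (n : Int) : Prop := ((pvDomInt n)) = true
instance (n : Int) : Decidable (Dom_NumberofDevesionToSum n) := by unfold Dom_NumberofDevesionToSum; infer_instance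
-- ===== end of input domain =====

-- B computes each DP cell by reading a prefix-sum of earlier rows instead of A's innermost summation loop (alternative algorithm; return value proved identical).


-- ===== PORT A =====
def NumberofDevesionToSum (n : Int) : Int :=
  let t0 : List (List Int) :=
    (PySem.List.pyRange 0 n 1).map (fun _ => (PySem.List.pyRange 0 n 1).map (fun _ => (0:Int)))
  let t1 := (PySem.List.pyRange 0 n 1).foldl (fun t i =>
      let t := PySem.List.pySetD t i (PySem.List.pySetD (PySem.List.pyGetD t i []) i 1)
      PySem.List.pySetD t i (PySem.List.pySetD (PySem.List.pyGetD t i []) 0 1)) t0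
  let t2 := (PySem.List.pyRange 1 n 1).foldl (fun t i =>
      (PySem.List.pyRange 1 i 1).foldl (fun t j =>
        (PySem.List.pyRange 0 j 1).foldl (fun t k =>
          PySem.List.pySetD t i (PySem.List.pySetD (PySem.List.pyGetD t i []) j
            (PySem.List.pyGetD (PySem.List.pyGetD t i []) j 0
              + PySem.List.pyGetD (PySem.List.pyGetD t (i - j) []) k 0))) t) t) t1
  (PySem.List.pyRange 0 n 1).foldl
    (fun r i => r + PySem.List.pyGetD (PySem.List.pyGetD t2 (n - 1) []) i 0) 0

-- ===== PORT B =====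
def NumberofDevesionToSum_alt (n : Int) : Int :=
  if n ≤ 0 then 0
  else
    let P := (PySem.List.pyRange 0 n 1).foldl (fun P i =>
      let pref0 : List Int := List.replicate n.toNat 0
      let pref := (PySem.List.pyRange 0 n 1).foldl (fun pref j =>
        let tij : Int :=
          if j = 0 ∨ j = i then 1
          else if j < i then PySem.List.pyGetD (PySem.List.pyGetD P (i - j) []) (j - 1) 0
          else 0
        PySem.List.pySetD pref j
          (if j = 0 then tij else PySem.List.pyGetD pref (j - 1) 0 + tij)) pref0
      P ++ [pref]) []
    PySem.List.pyGetD (PySem.List.pyGetD P (n - 1) []) (n - 1) 0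

-- ===== PRECONDITION & SPEC =====
def Spec_NumberofDevesionToSum (n : Int) (out : Int) : Prop := out = NumberofDevesionToSum_alt n
instance (n : Int) (out : Int) : Decidable (Spec_NumberofDevesionToSum n out) := by unfold Spec_NumberofDevesionToSum; infer_instance

-- ===== CLAIM (what is proved, stated in full; the proofs are below) =====
def Claim_equal_NumberofDevesionToSum : Prop := ∀ (n : Int), Dom_NumberofDevesionToSum n → Spec_NumberofDevesionToSum n (NumberofDevesionToSum n)

-- ===== LEMMAS AND PROOFS =====

-- Reference DP value: pvT i j = A's final t[i][j] (0/1 pattern off the strict triangle).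
def pvT (i j : Nat) : Int :=
  if j = 0 then 1
  else if j = i then 1
  else if _h : j < i then ((List.range j).map (fun k => pvT (i - j) k)).sum
  else 0
termination_by i
decreasing_by omega

lemma pvT_zero (i : Nat) : pvT i 0 = 1 := by rw [pvT]; simp

lemma pvT_diag (i : Nat) : pvT i i = 1 := by
  rw [pvT]; by_cases h : i = 0 <;> simp [h]

lemma pvT_lt {i j : Nat} (h0 : j ≠ 0) (h : j < i) :
    pvT i j = ((List.range j).map (pvT (i - j))).sum := by
  rw [pvT]; simp [h0, Nat.ne_of_lt h, h]

lemma pvT_gt {i j : Nat} (h0 : j ≠ 0) (h : i < j) : pvT i j = 0 := by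
  rw [pvT]; simp [h0, Nat.ne_of_lt' h, Nat.lt_asymm h]

lemma getD_map_range {α : Type} {N i : Nat} (hi : i < N) (f : Nat → α) (d : α) :
    ((List.range N).map f).getD i d = f i := by
  rw [List.getD_eq_getElem?_getD]
  simp [hi]

lemma set_map_range {α : Type} {N i : Nat} (hi : i < N) (f : Nat → α) (v : α) :
    ((List.range N).map f).set i v = (List.range N).map (fun k => if k = i then v else f k) := by
  apply List.ext_getElem
  · simp
  intro j hj hj'
  simp only [List.getElem_set, List.getElem_map, List.getElem_range]
  by_cases h : i = j <;> simp [h, Eq.comm]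

-- table as a map over List.range
def pvTbl (N : Nat) (F : Nat → Nat → Int) : List (List Int) :=
  (List.range N).map (fun i => (List.range N).map (F i))

lemma pvTbl_congr {N : Nat} {F G : Nat → Nat → Int}
    (h : ∀ i < N, ∀ j < N, F i j = G i j) : pvTbl N F = pvTbl N G := by
  unfold pvTbl
  apply List.map_congr_left
  intro i hi
  apply List.map_congr_left
  intro j hj
  exact h i (List.mem_range.mp hi) j (List.mem_range.mp hj)

lemma pvTbl_get {N : Nat} (F : Nat → Nat → Int) {i j : Nat} (hi : i < N) (hj : j < N) :
    PySem.List.pyGetD (PySem.List.pyGetD (pvTbl N F) (i : Int) []) (j : Int) 0 = F i j := by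
  unfold pvTbl
  rw [PySem.List.pyGetD_natCast (d := ([] : List Int)), getD_map_range hi,
    PySem.List.pyGetD_natCast, getD_map_range hj]

lemma pvTbl_set {N : Nat} (F : Nat → Nat → Int) {i j : Nat} (hi : i < N) (hj : j < N) (v : Int) :
    PySem.List.pySetD (pvTbl N F) (i : Int)
      (PySem.List.pySetD (PySem.List.pyGetD (pvTbl N F) (i : Int) []) (j : Int) v)
    = pvTbl N (fun a b => if a = i ∧ b = j then v else F a b) := by
  unfold pvTbl
  rw [PySem.List.pyGetD_natCast (d := ([] : List Int)), getD_map_range hi, PySem.List.pySetD_natCast,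
    PySem.List.pySetD_natCast, set_map_range hj, set_map_range hi]
  apply List.map_congr_left
  intro a _
  by_cases ha : a = i
  · subst ha
    simp only [if_pos rfl]
    apply List.map_congr_left
    intro b _
    by_cases hb : b = j <;> simp [hb]
  · simp only [if_neg ha]
    apply List.map_congr_left
    intro b _
    simp [ha]

-- Phase 1: the init loop of A
lemma loopA1 (N : Nat) (F : Nat → Nat → Int) (m : Nat) (hm : m ≤ N) :
    (PySem.List.pyRange 0 (m : Int) 1).foldl (fun t i =>
      let t := PySem.List.pySetD t i (PySem.List.pySetD (PySem.List.pyGetD t i []) i 1)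
      PySem.List.pySetD t i (PySem.List.pySetD (PySem.List.pyGetD t i []) 0 1)) (pvTbl N F)
    = pvTbl N (fun i j => if i < m ∧ (j = 0 ∨ j = i) then 1 else F i j) := by
  induction m with
  | zero =>
    rw [show ((0:Nat):Int) = 0 from rfl, PySem.List.pyRange_one_eq_nil (by omega)]
    simp only [List.foldl_nil]
    exact pvTbl_congr (by intro i hi j hj; simp)
  | succ m ih =>
    have hm' : m ≤ N := by omega
    have hmN : m < N := by omega
    rw [show ((m+1 : Nat) : Int) = (m : Int) + 1 by push_cast; ring,
      PySem.List.pyRange_one_succ_right (by positivity), List.foldl_append,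
      ih hm']
    simp only [List.foldl_cons, List.foldl_nil]
    rw [pvTbl_set _ hmN hmN,
      show ((0:Int)) = ((0:Nat):Int) from rfl, pvTbl_set _ hmN (by omega)]
    exact pvTbl_congr (by
      intro i hi j hj
      split_ifs <;> first | rfl | omega)

-- innermost k-loop of A at row a, column b
lemma loopAk (N : Nat) (H : Nat → Nat → Int) (a b : Nat)
    (hb0 : 1 ≤ b) (hba : b < a) (haN : a < N) (q : Nat) (hq : q ≤ b) :
    (PySem.List.pyRange 0 (q : Int) 1).foldl (fun t k =>
        PySem.List.pySetD t (a : Int) (PySem.List.pySetD (PySem.List.pyGetD t (a : Int) []) (b : Int)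
          (PySem.List.pyGetD (PySem.List.pyGetD t (a : Int) []) (b : Int) 0
            + PySem.List.pyGetD (PySem.List.pyGetD t ((a : Int) - (b : Int)) []) k 0))) (pvTbl N H)
    = pvTbl N (fun x y => if x = a ∧ y = b then
        H a b + ((List.range q).map (H (a - b))).sum else H x y) := by
  have hbN : b < N := by omega
  have habN : a - b < N := by omega
  have hab : ((a : Int) - (b : Int)) = ((a - b : Nat) : Int) := by push_cast [Nat.cast_sub (le_of_lt hba)]; ring
  induction q with
  | zero =>
    rw [show ((0:Nat):Int) = 0 from rfl, PySem.List.pyRange_one_eq_nil (by omega)]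
    simp only [List.foldl_nil]
    refine pvTbl_congr (fun i hi j hj => ?_)
    split_ifs with h
    · obtain ⟨rfl, rfl⟩ := h; simp
    · rfl
  | succ q ih =>
    have hq' : q ≤ b := by omega
    have hqN : q < N := by omega
    rw [show ((q+1 : Nat) : Int) = (q : Int) + 1 by push_cast; ring,
      PySem.List.pyRange_one_succ_right (by positivity), List.foldl_append,
      ih hq']
    simp only [List.foldl_cons, List.foldl_nil]
    rw [hab, pvTbl_get _ haN hbN, pvTbl_get _ habN hqN, pvTbl_set _ haN hbN]
    have hne : ¬(a - b = a ∧ q = b) := by omega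
    rw [if_pos ⟨rfl, rfl⟩, if_neg hne]
    refine pvTbl_congr (fun i hi j hj => ?_)
    by_cases hij : i = a ∧ j = b
    · obtain ⟨rfl, rfl⟩ := hij
      simp [List.range_succ, add_assoc]
    · simp [hij]

-- middle j-loop of A at row a
lemma loopAj (N : Nat) (H : Nat → Nat → Int) (a : Nat)
    (ha0 : 1 ≤ a) (haN : a < N)
    (hrow : ∀ i' < a, ∀ k < N, H i' k = pvT i' k)
    (hz : ∀ j, 1 ≤ j → j < a → H a j = 0)
    (p : Nat) (hp0 : 1 ≤ p) (hpa : p ≤ a) :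
    (PySem.List.pyRange 1 (p : Int) 1).foldl (fun t j =>
        (PySem.List.pyRange 0 j 1).foldl (fun t k =>
          PySem.List.pySetD t (a : Int) (PySem.List.pySetD (PySem.List.pyGetD t (a : Int) []) j
            (PySem.List.pyGetD (PySem.List.pyGetD t (a : Int) []) j 0
              + PySem.List.pyGetD (PySem.List.pyGetD t ((a : Int) - j) []) k 0))) t) (pvTbl N H)
    = pvTbl N (fun x y => if x = a ∧ 1 ≤ y ∧ y < p then pvT a y else H x y) := by
  induction p with
  | zero => omega
  | succ p ih =>
    by_cases hp1 : p = 0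
    · subst hp1
      rw [show ((0+1 : Nat) : Int) = 1 from rfl, PySem.List.pyRange_one_eq_nil (by omega)]
      simp only [List.foldl_nil]
      exact pvTbl_congr (by intro i hi j hj; split_ifs with h <;> omega)
    · have hpa' : p ≤ a := by omega
      have hp0' : 1 ≤ p := by omega
      have hpltA : p < a := by omega
      rw [show ((p+1 : Nat) : Int) = (p : Int) + 1 by push_cast; ring,
        PySem.List.pyRange_one_succ_right (by exact_mod_cast hp0'), List.foldl_append,
        ih hp0' hpa']
      simp only [List.foldl_cons, List.foldl_nil]
      rw [loopAk N _ a p hp0' hpltA haN p (le_refl p)]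
      refine pvTbl_congr (fun i hi j hj => ?_)
      have hap : a - p < a := by omega
      have hsum : ((List.range p).map (fun k =>
          if a - p = a ∧ 1 ≤ k ∧ k < p then pvT a k else H (a - p) k)).sum
          = ((List.range p).map (pvT (a - p))).sum := by
        refine congrArg List.sum (List.map_congr_left fun k hk => ?_)
        have hk' : k < p := List.mem_range.mp hk
        rw [if_neg (by omega)]
        exact hrow (a - p) hap k (by omega)
      by_cases hij : i = a ∧ j = p
      · obtain ⟨rfl, rfl⟩ := hij
        rw [if_pos ⟨rfl, rfl⟩, hsum,
          if_neg (show ¬(i = i ∧ 1 ≤ j ∧ j < j) by omega),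
          if_pos (show i = i ∧ 1 ≤ j ∧ j < j + 1 by omega),
          hz j hp0' hpltA, zero_add]
        exact (pvT_lt hp1 hpltA).symm
      · rw [if_neg hij]
        split_ifs <;> first | rfl | (exfalso; omega)

def pvG1 (i j : Nat) : Int := if j = 0 ∨ j = i then 1 else 0

lemma pvG1_eq_pvT_zero (j : Nat) : pvG1 0 j = pvT 0 j := by
  unfold pvG1
  by_cases h : j = 0
  · simp [h, pvT_zero]
  · rw [if_neg (by omega), pvT_gt h (by omega)]

-- outer i-loop of A
lemma loopAi (N : Nat) (m : Nat) (hm0 : 1 ≤ m) (hmN : m ≤ N) :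
    (PySem.List.pyRange 1 (m : Int) 1).foldl (fun t i =>
      (PySem.List.pyRange 1 i 1).foldl (fun t j =>
        (PySem.List.pyRange 0 j 1).foldl (fun t k =>
          PySem.List.pySetD t i (PySem.List.pySetD (PySem.List.pyGetD t i []) j
            (PySem.List.pyGetD (PySem.List.pyGetD t i []) j 0
              + PySem.List.pyGetD (PySem.List.pyGetD t (i - j) []) k 0))) t) t) (pvTbl N pvG1)
    = pvTbl N (fun i j => if i < m then pvT i j else pvG1 i j) := by
  induction m with
  | zero => omega
  | succ m ih =>
    by_cases hm1 : m = 0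
    · subst hm1
      rw [show ((0+1 : Nat) : Int) = 1 from rfl, PySem.List.pyRange_one_eq_nil (by omega)]
      simp only [List.foldl_nil]
      refine pvTbl_congr (fun i hi j hj => ?_)
      split_ifs with h
      · rw [show i = 0 by omega, pvG1_eq_pvT_zero]
      · rfl
    · have hm0' : 1 ≤ m := by omega
      have hmN' : m ≤ N := by omega
      have hmN'' : m < N := by omega
      rw [show ((m+1 : Nat) : Int) = (m : Int) + 1 by push_cast; ring,
        PySem.List.pyRange_one_succ_right (by exact_mod_cast hm0'), List.foldl_append,
        ih hm0' hmN']
      simp only [List.foldl_cons, List.foldl_nil]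
      rw [loopAj N _ m hm0' hmN''
        (by intro i' hi' k hk; rw [if_pos hi'])
        (by intro j hj1 hj2; rw [if_neg (by omega)]; unfold pvG1; rw [if_neg (by omega)])
        m hm0' (le_refl m)]
      refine pvTbl_congr (fun i hi j hj => ?_)
      by_cases him : i = m
      · subst him
        by_cases hj0 : j = 0
        · subst hj0
          rw [if_neg (by omega), if_neg (by omega), if_pos (by omega), pvT_zero]
          unfold pvG1; rw [if_pos (by omega)]
        · by_cases hjlt : j < i
          · rw [if_pos (by omega), if_pos (by omega)]
          · by_cases hje : j = i
            · subst hje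
              rw [if_neg (by omega), if_neg (by omega), if_pos (by omega), pvT_diag]
              unfold pvG1; rw [if_pos (by omega)]
            · rw [if_neg (by omega), if_neg (by omega), if_pos (by omega),
                pvT_gt hj0 (by omega)]
              unfold pvG1; rw [if_neg (by omega)]
      · rw [if_neg (by omega)]
        split_ifs <;> first | rfl | (exfalso; omega)

-- final summation loop of A
lemma loopAsum (N : Nat) (hN : 1 ≤ N) (G : Nat → Nat → Int) (m : Nat) (hm : m ≤ N) (c : Int) :
    (PySem.List.pyRange 0 (m : Int) 1).foldl
      (fun r i => r + PySem.List.pyGetD (PySem.List.pyGetD (pvTbl N G) ((N : Int) - 1) []) i 0) c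
    = c + ((List.range m).map (G (N - 1))).sum := by
  have hcast : ((N : Int) - 1) = ((N - 1 : Nat) : Int) := by omega
  induction m with
  | zero =>
    rw [show ((0:Nat):Int) = 0 from rfl, PySem.List.pyRange_one_eq_nil (by omega)]
    simp
  | succ m ih =>
    rw [show ((m+1 : Nat) : Int) = (m : Int) + 1 by push_cast; ring,
      PySem.List.pyRange_one_succ_right (by positivity), List.foldl_append,
      ih (by omega)]
    simp only [List.foldl_cons, List.foldl_nil]
    rw [hcast, pvTbl_get G (by omega) (by omega), List.range_succ, List.map_append,
      List.sum_append]
    simp [add_assoc]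

-- characterization of A for positive arguments
lemma A_char (N : Nat) (hN : 1 ≤ N) :
    NumberofDevesionToSum (N : Int) = ((List.range N).map (pvT (N - 1))).sum := by
  have ht0 : ((PySem.List.pyRange 0 (N:Int) 1).map
      (fun _ => (PySem.List.pyRange 0 (N:Int) 1).map (fun _ => (0:Int))))
      = pvTbl N (fun _ _ => (0:Int)) := by
    rw [PySem.List.pyRange_one]
    simp [pvTbl, List.map_map, Function.comp_def]
  have h1 : pvTbl N (fun i j => if i < N ∧ (j = 0 ∨ j = i) then (1:Int) else (0:Int))
      = pvTbl N pvG1 :=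
    pvTbl_congr (by intro i hi j hj; unfold pvG1; split_ifs <;> first | rfl | omega)
  have h2 : pvTbl N (fun i j => if i < N then pvT i j else pvG1 i j) = pvTbl N pvT :=
    pvTbl_congr (by intro i hi j hj; rw [if_pos hi])
  simp only [NumberofDevesionToSum]
  rw [ht0, loopA1 N _ N (le_refl N), h1, loopAi N N hN (le_refl N), h2,
    loopAsum N hN pvT N (le_refl N) 0, zero_add]

def pvSp (i j : Nat) : Int := ((List.range (j + 1)).map (pvT i)).sum
def pvPref (N m : Nat) : List (List Int) :=
  (List.range m).map (fun i => (List.range N).map (pvSp i))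

lemma pvSp_eq_pvT {a p : Nat} (h0 : p ≠ 0) (h : p < a) : pvSp (a - p) (p - 1) = pvT a p := by
  rw [pvT_lt h0 h, pvSp, show p - 1 + 1 = p by omega]

-- the row-filling loop of B at row a
lemma loopBrow (N a : Nat) (haN : a < N) (p : Nat) (hp : p ≤ N) :
    (PySem.List.pyRange 0 (p : Int) 1).foldl (fun pref j =>
        let tij : Int :=
          if j = 0 ∨ j = (a : Int) then 1
          else if j < (a : Int) then
            PySem.List.pyGetD (PySem.List.pyGetD (pvPref N a) ((a : Int) - j) []) (j - 1) 0
          else 0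
        PySem.List.pySetD pref j
          (if j = 0 then tij else PySem.List.pyGetD pref (j - 1) 0 + tij))
      ((List.range N).map (fun _ => (0:Int)))
    = (List.range N).map (fun j => if j < p then pvSp a j else 0) := by
  induction p with
  | zero =>
    rw [show ((0:Nat):Int) = 0 from rfl, PySem.List.pyRange_one_eq_nil (by omega)]
    simp
  | succ p ih =>
    have hpN : p < N := by omega
    rw [show ((p+1 : Nat) : Int) = (p : Int) + 1 by push_cast; ring,
      PySem.List.pyRange_one_succ_right (by positivity), List.foldl_append,
      ih (by omega)]
    simp only [List.foldl_cons, List.foldl_nil]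
    have htij : (if (p : Int) = 0 ∨ (p : Int) = (a : Int) then (1:Int)
        else if (p : Int) < (a : Int) then
          PySem.List.pyGetD (PySem.List.pyGetD (pvPref N a) ((a : Int) - (p : Int)) []) ((p : Int) - 1) 0
        else 0) = pvT a p := by
      by_cases h0 : p = 0
      · rw [if_pos (Or.inl (show (p:Int) = 0 by exact_mod_cast h0)), h0, pvT_zero]
      · by_cases hpa : p = a
        · rw [if_pos (Or.inr (show (p:Int) = (a:Int) by exact_mod_cast hpa)), hpa, pvT_diag]
        · rw [if_neg (by omega)]
          by_cases hlt : p < a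
          · rw [if_pos (by exact_mod_cast hlt),
              show ((a : Int) - (p : Int)) = ((a - p : Nat) : Int) by omega,
              show ((p : Int) - 1) = ((p - 1 : Nat) : Int) by omega]
            unfold pvPref
            rw [PySem.List.pyGetD_natCast, PySem.List.pyGetD_natCast,
              getD_map_range (show a - p < a by omega),
              getD_map_range (show p - 1 < N by omega)]
            exact pvSp_eq_pvT h0 hlt
          · rw [if_neg (by exact_mod_cast hlt), pvT_gt h0 (by omega)]
    rw [htij]
    have hval : (if (p : Int) = 0 then pvT a p
        else PySem.List.pyGetD ((List.range N).map (fun j => if j < p then pvSp a j else 0))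
          ((p : Int) - 1) 0 + pvT a p) = pvSp a p := by
      by_cases h0 : p = 0
      · rw [if_pos (by exact_mod_cast h0), h0, pvSp]
        simp
      · rw [if_neg (by exact_mod_cast h0),
          show ((p : Int) - 1) = ((p - 1 : Nat) : Int) by omega,
          PySem.List.pyGetD_natCast, getD_map_range (show p - 1 < N by omega),
          if_pos (show p - 1 < p by omega), pvSp, pvSp, show p - 1 + 1 = p by omega,
          List.range_succ, List.map_append, List.sum_append]
        simp
    rw [hval, PySem.List.pySetD_natCast, set_map_range hpN]
    refine List.map_congr_left (fun j hj => ?_)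
    have hj' : j < N := List.mem_range.mp hj
    split_ifs with h1 h2 h3 h4 <;> first | rfl | (exfalso; omega) | (rw [h1])

-- outer row loop of B
lemma loopBP (N : Nat) (m : Nat) (hm : m ≤ N) :
    (PySem.List.pyRange 0 (m : Int) 1).foldl (fun P i =>
      let pref0 : List Int := List.replicate ((N : Int)).toNat 0
      let pref := (PySem.List.pyRange 0 (N : Int) 1).foldl (fun pref j =>
        let tij : Int :=
          if j = 0 ∨ j = i then 1
          else if j < i then PySem.List.pyGetD (PySem.List.pyGetD P (i - j) []) (j - 1) 0
          else 0
        PySem.List.pySetD pref j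
          (if j = 0 then tij else PySem.List.pyGetD pref (j - 1) 0 + tij)) pref0
      P ++ [pref]) []
    = pvPref N m := by
  induction m with
  | zero =>
    rw [show ((0:Nat):Int) = 0 from rfl,
      PySem.List.pyRange_one_eq_nil (a := 0) (b := 0) (by omega)]
    simp [pvPref]
  | succ m ih =>
    have hmN : m < N := by omega
    rw [show ((m+1 : Nat) : Int) = (m : Int) + 1 by push_cast; ring,
      PySem.List.pyRange_one_succ_right (by positivity), List.foldl_append,
      ih (by omega)]
    simp only [List.foldl_cons, List.foldl_nil]
    rw [show ((N : Int)).toNat = N from Int.toNat_natCast N,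
      show List.replicate N (0:Int) = (List.range N).map (fun _ => (0:Int)) by simp,
      loopBrow N m hmN N (le_refl N)]
    have hrow : ((List.range N).map (fun j => if j < N then pvSp m j else 0))
        = (List.range N).map (pvSp m) :=
      List.map_congr_left (fun j hj => if_pos (List.mem_range.mp hj))
    rw [hrow]
    unfold pvPref
    rw [List.range_succ, List.map_append]
    rfl

-- characterization of B for positive arguments
lemma B_char (N : Nat) (hN : 1 ≤ N) :
    NumberofDevesionToSum_alt (N : Int) = ((List.range N).map (pvT (N - 1))).sum := by
  simp only [NumberofDevesionToSum_alt]
  rw [if_neg (not_le.mpr (Int.natCast_pos.mpr (by omega))),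
    loopBP N N (le_refl N),
    show ((N : Int) - 1) = ((N - 1 : Nat) : Int) by omega,
    PySem.List.pyGetD_natCast, PySem.List.pyGetD_natCast]
  unfold pvPref
  rw [getD_map_range (show N - 1 < N by omega), getD_map_range (show N - 1 < N by omega)]
  unfold pvSp
  rw [show N - 1 + 1 = N by omega]

-- ===== VERDICT (by name: the statement is the Claim_ definition above) =====
theorem NumberofDevesionToSum_spec : Claim_equal_NumberofDevesionToSum := by
  intro n _
  unfold Spec_NumberofDevesionToSum
  by_cases hn : n ≤ 0
  · have h1 : PySem.List.pyRange 0 n 1 = [] := PySem.List.pyRange_one_eq_nil (by omega)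
    have h2 : PySem.List.pyRange 1 n 1 = [] := PySem.List.pyRange_one_eq_nil (by omega)
    simp [NumberofDevesionToSum, NumberofDevesionToSum_alt, h1, h2, hn]
  · have hN : 1 ≤ n.toNat := by omega
    have hn' : n = (n.toNat : Int) := by omega
    rw [hn', A_char n.toNat hN, B_char n.toNat hN]
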